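-- pv_equiv track=rewrite | github.com/bharatbushan03/student-assistant-chatbot | app/utils/text_cleaning.py | extract_headings_and_content
-- ===== SOURCE A (Python) =====
-- from typing import List
--
-- def extract_headings_and_content(text: str) -> List[dict]:
--     """
--     Extract sections with their headings for better chunking.
--
--     Returns a list of dicts with 'heading' and 'content' keys.
--     """
--     sections = []
--     lines = text.split('\n')
--     current_heading = ""
--     current_content = []
--
--     for line in lines:
--         line = line.strip()
--         if not line:
--             continue
--
--         # Detect headings (lines that look like headers)
--         is_heading = (
--             line.isupper() or
--             (len(line) < 100 and line.endswith(':')) or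
--             line.startswith(('#', '##', '###')) or
--             (len(line) < 80 and not any(c.islower() for c in line))
--         )
--
--         if is_heading:
--             if current_content:
--                 sections.append({
--                     'heading': current_heading,
--                     'content': '\n'.join(current_content)
--                 })
--             current_heading = line.lstrip('#').strip()
--             current_content = []
--         else:
--             current_content.append(line)
--
--     # Don't forget the last section
--     if current_content:
--         sections.append({
--             'heading': current_heading,
--             'content': '\n'.join(current_content)
--         })
--
--     return sections
-- ===== SOURCE B (Python) =====
-- from typing import List
--
--
-- def _is_heading(line: str) -> bool:
--     return (
--         line.isupper() or
--         (len(line) < 100 and line.endswith(':')) or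
--         line.startswith('#') or
--         (len(line) < 80 and not any(c.islower() for c in line))
--     )
--
--
-- def extract_headings_and_content(text: str) -> List[dict]:
--     # Two-phase run-grouping: pre-clean the lines once, then emit one section
--     # per maximal run of content lines, keyed by the last heading seen.
--     lines = [s for s in (l.strip() for l in text.split('\n')) if s]
--     sections = []
--     heading = ""
--     i = 0
--     n = len(lines)
--     while i < n:
--         if _is_heading(lines[i]):
--             heading = lines[i].lstrip('#').strip()
--             i += 1
--         else:
--             j = i + 1
--             while j < n and not _is_heading(lines[j]):
--                 j += 1
--             sections.append({'heading': heading, 'content': '\n'.join(lines[i:j])})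
--             i = j
--     return sections
-- ===== Notes on version B (the rewrite author's own statement) =====
-- stated objective: alternative
-- what changed: Replaces A's single stateful accumulator loop (pending content buffer flushed on each heading and once more after the loop) with a two-phase run-grouping pass: strip and filter the lines once, then emit one section per maximal run of content lines under the last heading seen, with no pending buffer and no final flush.
import Mathlib
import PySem

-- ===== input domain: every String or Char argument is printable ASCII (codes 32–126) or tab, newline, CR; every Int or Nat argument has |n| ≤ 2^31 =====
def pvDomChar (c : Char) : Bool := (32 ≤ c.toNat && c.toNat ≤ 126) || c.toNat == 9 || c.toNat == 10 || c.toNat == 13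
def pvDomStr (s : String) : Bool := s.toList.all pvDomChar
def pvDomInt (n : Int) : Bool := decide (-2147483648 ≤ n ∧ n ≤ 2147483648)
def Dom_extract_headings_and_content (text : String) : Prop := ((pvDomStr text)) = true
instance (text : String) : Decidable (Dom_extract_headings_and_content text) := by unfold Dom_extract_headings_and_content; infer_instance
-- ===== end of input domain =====

-- B replaces A's stateful flush-on-heading accumulator loop by a two-phase run-grouping
-- pass (clean lines once, then one section per maximal content run); alternative decomposition, same cost.

-- ===== PORT A =====

-- Python str.isupper(), exact on ASCII: at least one cased char and no lowercase char.
def pvStrIsupper (cs : List Char) : Bool :=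
  (cs.any (fun c => PySem.Chars.isupper c || PySem.Chars.islower c)) &&
  (cs.all (fun c => !PySem.Chars.islower c))

-- A's is_heading predicate on a stripped line (shared wording; Source B reuses the same predicate).
def pvIsHeading (cs : List Char) : Bool :=
  pvStrIsupper cs ||
  (decide (cs.length < 100) && PySem.Chars.endswith cs [':']) ||
  (PySem.Chars.startswith cs ['#'] || PySem.Chars.startswith cs ['#','#'] ||
   PySem.Chars.startswith cs ['#','#','#']) ||
  (decide (cs.length < 80) && !(cs.any (fun c => PySem.Chars.islower c)))

-- line.lstrip('#').strip()  (lstrip with an explicit char set: drop leading '#' by hand, exact)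
def pvNewHeading (cs : List Char) : List Char :=
  PySem.Chars.strip (cs.dropWhile (fun c => c == '#'))

def pvMkSec (heading : List Char) (content : List (List Char)) : List (String × String) :=
  [("heading", String.ofList heading), ("content", String.ofList (PySem.Chars.join ['\n'] content))]

-- one iteration of A's for-loop; state = (sections, current_heading, current_content)
def pvAStep (st : List (List (String × String)) × List Char × List (List Char))
    (l : List Char) : List (List (String × String)) × List Char × List (List Char) :=
  let line := PySem.Chars.strip l
  if line.isEmpty then st
  else if pvIsHeading line then
    ((if st.2.2.isEmpty then st.1 else st.1 ++ [pvMkSec st.2.1 st.2.2]), pvNewHeading line, [])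
  else (st.1, st.2.1, st.2.2 ++ [line])

def extract_headings_and_content (text : String) : List (List (String × String)) :=
  let lines := PySem.Chars.splitOn text.toList ['\n']
  let st := lines.foldl pvAStep ([], [], [])
  if st.2.2.isEmpty then st.1 else st.1 ++ [pvMkSec st.2.1 st.2.2]

-- ===== PORT B =====

-- outer while-loop of Source B: heading lines update the heading, a content line opens a
-- maximal run (the inner while = takeWhile/dropWhile) emitted as one section
def pvBGo (heading : List Char) (lines : List (List Char)) : List (List (String × String)) :=
  match lines with
  | [] => []
  | l :: rest =>
    if pvIsHeading l then pvBGo (pvNewHeading l) rest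
    else
      pvMkSec heading ((l :: rest).takeWhile (fun x => !pvIsHeading x)) ::
        pvBGo heading (rest.dropWhile (fun x => !pvIsHeading x))
termination_by lines.length
decreasing_by
  · simp
  · have h1 := List.length_dropWhile_le (fun x => !pvIsHeading x) rest
    have h2 : (l :: rest).length = rest.length + 1 := rfl
    omega

def extract_headings_and_content_alt (text : String) : List (List (String × String)) :=
  let lines := ((PySem.Chars.splitOn text.toList ['\n']).map PySem.Chars.strip).filter
    (fun s => !s.isEmpty)
  pvBGo [] lines

-- ===== PRECONDITION & SPEC =====
def Spec_extract_headings_and_content (text : String) (out : List (List (String × String))) : Prop := out = extract_headings_and_content_alt text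
instance (text : String) (out : List (List (String × String))) : Decidable (Spec_extract_headings_and_content text out) := by unfold Spec_extract_headings_and_content; infer_instance

-- ===== CLAIM (what is proved, stated in full; the proofs are below) =====
def Claim_equal_extract_headings_and_content : Prop := ∀ (text : String), Dom_extract_headings_and_content text → Spec_extract_headings_and_content text (extract_headings_and_content text)

-- ===== LEMMAS AND PROOFS =====

-- the post-loop flush of A, as a function of the loop state
def pvFlush (st : List (List (String × String)) × List Char × List (List Char)) :
    List (List (String × String)) :=
  if st.2.2.isEmpty then st.1 else st.1 ++ [pvMkSec st.2.1 st.2.2]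

-- A's loop, written as structural recursion on the remaining raw lines, final flush included.
def pvAGo (heading : List Char) (content : List (List Char)) (lines : List (List Char)) :
    List (List (String × String)) :=
  match lines with
  | [] => if content.isEmpty then [] else [pvMkSec heading content]
  | l :: rest =>
    let line := PySem.Chars.strip l
    if line.isEmpty then pvAGo heading content rest
    else if pvIsHeading line then
      (if content.isEmpty then [] else [pvMkSec heading content]) ++ pvAGo (pvNewHeading line) [] rest
    else pvAGo heading (content ++ [line]) rest

-- the same recursion on already-cleaned lines (stripped, non-empty)
def pvAGoC (heading : List Char) (content : List (List Char)) (lines : List (List Char)) :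
    List (List (String × String)) :=
  match lines with
  | [] => if content.isEmpty then [] else [pvMkSec heading content]
  | l :: rest =>
    if pvIsHeading l then
      (if content.isEmpty then [] else [pvMkSec heading content]) ++ pvAGoC (pvNewHeading l) [] rest
    else pvAGoC heading (content ++ [l]) rest

theorem pvA_foldl_eq (lines : List (List Char)) :
    ∀ (secs : List (List (String × String))) (h : List Char) (cc : List (List Char)),
    pvFlush (lines.foldl pvAStep (secs, h, cc)) = secs ++ pvAGo h cc lines := by
  induction lines with
  | nil => intro secs h cc; simp only [List.foldl_nil, pvFlush, pvAGo]; split <;> simp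
  | cons l rest ih =>
    intro secs h cc
    simp only [List.foldl_cons, pvAStep, pvAGo]
    by_cases he : (PySem.Chars.strip l).isEmpty
    · simp only [he, if_pos]; exact ih secs h cc
    · by_cases hh : pvIsHeading (PySem.Chars.strip l)
      · simp only [he, hh, Bool.false_eq_true, if_neg, if_pos, not_false_iff]
        rw [ih]
        split <;> simp
      · simp only [he, hh, Bool.false_eq_true, if_neg, not_false_iff]
        exact ih secs h (cc ++ [PySem.Chars.strip l])

-- strip/skip of the raw loop = pre-cleaning the line list once
theorem pvA_raw_clean (lines : List (List Char)) :
    ∀ (h : List Char) (cc : List (List Char)),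
    pvAGo h cc lines =
      pvAGoC h cc (((lines.map PySem.Chars.strip).filter (fun s => !s.isEmpty))) := by
  induction lines with
  | nil => intro h cc; simp [pvAGo, pvAGoC]
  | cons l rest ih =>
    intro h cc
    simp only [pvAGo, List.map_cons, List.filter_cons]
    by_cases he : (PySem.Chars.strip l).isEmpty
    · simp [he, ih]
    · by_cases hh : pvIsHeading (PySem.Chars.strip l)
      · simp [he, hh, ih, pvAGoC]
      · simp [he, hh, ih, pvAGoC]

-- unfolding equations for B's well-founded recursion
theorem pvBGo_nil (h : List Char) : pvBGo h [] = [] := by rw [pvBGo.eq_def]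

theorem pvBGo_cons_head (h l : List Char) (rest : List (List Char)) (hh : pvIsHeading l = true) :
    pvBGo h (l :: rest) = pvBGo (pvNewHeading l) rest := by
  rw [pvBGo.eq_def]; simp [hh]

theorem pvBGo_cons_content (h l : List Char) (rest : List (List Char))
    (hh : ¬ pvIsHeading l = true) :
    pvBGo h (l :: rest) =
      pvMkSec h ((l :: rest).takeWhile (fun x => !pvIsHeading x)) ::
        pvBGo h (rest.dropWhile (fun x => !pvIsHeading x)) := by
  rw [pvBGo.eq_def]; simp [hh]

-- A's cleaned recursion equals B's run-grouping, for every pending-content state.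
theorem pvAGoC_eq_pvBGo (lines : List (List Char)) :
    ∀ (h : List Char) (cc : List (List Char)),
    pvAGoC h cc lines =
      if cc.isEmpty then pvBGo h lines
      else pvMkSec h (cc ++ lines.takeWhile (fun x => !pvIsHeading x)) ::
        pvBGo h (lines.dropWhile (fun x => !pvIsHeading x)) := by
  induction lines with
  | nil =>
    intro h cc
    cases cc <;> simp [pvAGoC, pvBGo_nil]
  | cons l rest ih =>
    intro h cc
    by_cases hh : pvIsHeading l
    · simp only [pvAGoC, hh, if_pos]
      rw [ih (pvNewHeading l) []]
      cases cc <;>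
        simp [pvBGo_cons_head h l rest hh, hh]
    · simp only [pvAGoC, hh, Bool.false_eq_true, if_neg, not_false_iff]
      rw [ih h (cc ++ [l])]
      cases cc <;>
        simp [pvBGo_cons_content h l rest hh, hh]

-- ===== VERDICT (by name: the statement is the Claim_ definition above) =====
theorem extract_headings_and_content_spec : Claim_equal_extract_headings_and_content := by
  intro text _
  unfold Spec_extract_headings_and_content
  have hA : extract_headings_and_content text =
      pvFlush ((PySem.Chars.splitOn text.toList ['\n']).foldl pvAStep ([], [], [])) := rfl
  rw [hA, pvA_foldl_eq, pvA_raw_clean, pvAGoC_eq_pvBGo]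
  rfl
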